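-- pv_equiv track=rewrite | github.com/lvclark/tagdigger | tagdigger_fun.py | compareTags
-- ===== SOURCE A (Python) =====
-- def compareTags(taglist, trim = True):
--     '''Find SNP alleles within a set of sequence tags representing the
--        same locus.'''
--     assert type(taglist) is list, "taglist must be list."
--     assert all([set(t) <= set('ATCG') for t in taglist]), \
--            "taglist must be a list of ACGT strings."
--     # make sure all tags are same length
--     if len(set([len(t) for t in taglist])) > 1:
--         if trim: # trim down to minimum length
--             minlen = min([len(t) for t in taglist])
--             taglist = [tag[:minlen] for tag in taglist]
--         else: # pad out to maximum length
--             maxlen = max([len(t) for t in taglist])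
--             taglist = [tag.ljust(maxlen, 'N') for tag in taglist]
--     # get index(es) and nucleotides for variable sites
--     result =[(i, [t[i] for t in taglist]) for i in range(len(taglist[0])) \
--                  if len(set([t[i] for t in taglist if t[i] != 'N'])) > 1]
--     return result
-- ===== SOURCE B (Python) =====
-- def compareTags(taglist, trim=True):
--     '''Find SNP alleles within a set of sequence tags representing the
--        same locus.'''
--     assert type(taglist) is list, "taglist must be list."
--     assert all(set(t) <= set('ATCG') for t in taglist), \
--            "taglist must be a list of ACGT strings."
--     lengths = [len(t) for t in taglist]
--     if len(set(lengths)) > 1: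
--         if trim:
--             m = min(lengths)
--             taglist = [t[:m] for t in taglist]
--         else:
--             m = max(lengths)
--             taglist = [t + 'N' * (m - len(t)) for t in taglist]
--     # single streaming pass over the tags: per position remember the first
--     # non-'N' character seen and a flag set once a different one appears
--     L = len(taglist[0])
--     first = [None] * L
--     var = [False] * L
--     for t in taglist:
--         for i, c in enumerate(t):
--             if c != 'N':
--                 if first[i] is None:
--                     first[i] = c
--                 elif c != first[i]:
--                     var[i] = True
--     return [(i, [t[i] for t in taglist]) for i in range(L) if var[i]]
-- ===== Notes on version B (the rewrite author's own statement) =====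
-- stated objective: alternative
-- what changed: Instead of building a set of characters per column, B detects variable sites in one streaming row-wise pass, maintaining per position only the first non-'N' character seen and a boolean flag flipped when a later non-'N' character differs; columns are materialized only for the flagged positions.
import Mathlib
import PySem

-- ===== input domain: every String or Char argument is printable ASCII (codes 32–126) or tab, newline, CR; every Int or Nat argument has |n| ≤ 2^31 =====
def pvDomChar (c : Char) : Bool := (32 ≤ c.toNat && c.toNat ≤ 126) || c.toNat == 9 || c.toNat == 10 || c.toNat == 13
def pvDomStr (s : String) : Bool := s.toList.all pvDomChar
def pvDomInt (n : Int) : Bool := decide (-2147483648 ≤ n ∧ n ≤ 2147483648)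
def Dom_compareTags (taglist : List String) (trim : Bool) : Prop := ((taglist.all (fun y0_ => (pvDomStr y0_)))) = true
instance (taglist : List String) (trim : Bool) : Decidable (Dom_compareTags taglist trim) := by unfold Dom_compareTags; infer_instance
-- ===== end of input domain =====

-- B replaces A's per-column set building by ONE streaming row-wise pass that keeps, per
-- position, the first non-'N' character and a 'variable' flag (objective: alternative).

-- ===== PORT A =====
-- assertions of A are reflected in Pre_; tag.ljust(maxlen,'N') ported by hand as append of
-- replicate — exact since maxlen ≥ len(tag); range(len(taglist[0])) on empty taglist raises
-- in Python (IndexError), excluded by Pre_ (port uses headD there).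
def compareTags (taglist : List String) (trim : Bool) : List (Int × List String) :=
  let tl0 := taglist.map String.toList
  let tl :=
    if (PySem.Set.ofList (tl0.map (fun t => (t.length : Int)))).length > 1 then
      if trim then
        (tl0.map (fun tag => PySem.List.slice tag none
          (some ((PySem.List.min? (tl0.map (fun t => (t.length : Int))) (fun x => x)).getD 0))))
      else
        (tl0.map (fun tag => tag ++ List.replicate
          (((PySem.List.max? (tl0.map (fun t => (t.length : Int))) (fun x => x)).getD 0).toNat - tag.length) 'N'))
    else tl0
  (List.range (tl.headD []).length).filterMap (fun i =>
    if PySem.Set.len (PySem.Set.ofList ((tl.map (fun t => t.getD i 'N')).filter (fun c => c ≠ 'N'))) > 1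
    then some ((i : Int), tl.map (fun t => String.ofList [t.getD i 'N'])) else none)

-- ===== PORT B =====
-- the body of Source B's inner loop: update one cell (first-non-'N' char, variable flag) with
-- the character c at that position
def pvCell (p : Option Char × Bool) (c : Char) : Option Char × Bool :=
  if c ≠ 'N' then
    match p.1 with
    | none => (some c, p.2)
    | some f => (some f, p.2 || decide (c ≠ f))
  else p

-- 'for i, c in enumerate(t): update first[i]/var[i] with c' — since every row has exactly
-- the state's length after normalization, the indexed in-place updates are transcribed as
-- this paired walk down state and row (exact on rectangular input)
def pvStep : List (Option Char × Bool) → List Char → List (Option Char × Bool)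
  | s, [] => s
  | [], _ => []
  | p :: s, c :: t => pvCell p c :: pvStep s t

def compareTags_alt (taglist : List String) (trim : Bool) : List (Int × List String) :=
  let tl0 := taglist.map String.toList
  let lengths := tl0.map (fun t => (t.length : Int))
  let tl :=
    if (PySem.Set.ofList lengths).length > 1 then
      if trim then
        tl0.map (fun t => t.take ((PySem.List.min? lengths (fun x => x)).getD 0).toNat)
      else
        tl0.map (fun t => t ++ List.replicate (((PySem.List.max? lengths (fun x => x)).getD 0).toNat - t.length) 'N')
    else tl0
  let L := (tl.headD []).length
  let st := tl.foldl pvStep (List.replicate L ((none : Option Char), false))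
  (List.range L).filterMap (fun i =>
    if (st.getD i (none, false)).2
    then some ((i : Int), tl.map (fun t => String.ofList [t.getD i 'N'])) else none)

-- ===== PRECONDITION & SPEC =====
-- Pre_ excludes the empty list (A raises IndexError at taglist[0]) and tags with characters
-- outside ACGT (A's assertion raises AssertionError).
def Pre_compareTags (taglist : List String) (trim : Bool) : Prop :=
  taglist ≠ [] ∧ (taglist.all (fun t => t.toList.all (fun c => c ∈ (['A', 'T', 'C', 'G'] : List Char)))) = true
instance (taglist : List String) (trim : Bool) : Decidable (Pre_compareTags taglist trim) := by
  unfold Pre_compareTags; infer_instance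

def pvWitness_compareTags : List String × Bool := (["ACG", "ATG"], true)

def Spec_compareTags (taglist : List String) (trim : Bool) (out : List (Int × List String)) : Prop :=
  out = compareTags_alt taglist trim
instance (taglist : List String) (trim : Bool) (out : List (Int × List String)) :
    Decidable (Spec_compareTags taglist trim out) := by unfold Spec_compareTags; infer_instance

-- ===== CLAIM (what is proved, stated in full; the proofs are below) =====
def Claim_equal_compareTags : Prop := ∀ (taglist : List String) (trim : Bool),
  Dom_compareTags taglist trim → Pre_compareTags taglist trim →
  Spec_compareTags taglist trim (compareTags taglist trim)

-- ===== LEMMAS AND PROOFS =====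

lemma pvStep_length (s : List (Option Char × Bool)) (t : List Char) :
    (pvStep s t).length = s.length := by
  induction s generalizing t with
  | nil => cases t <;> simp [pvStep]
  | cons p s ih => cases t <;> simp [pvStep, ih]

lemma pvStep_getD (s : List (Option Char × Bool)) (t : List Char) (i : Nat)
    (hi : i < s.length) (ht : i < t.length) :
    (pvStep s t).getD i (none, false) = pvCell (s.getD i (none, false)) (t.getD i 'N') := by
  induction s generalizing t i with
  | nil => simp at hi
  | cons p s ih =>
    cases t with
    | nil => simp at ht
    | cons c t =>
      cases i with
      | zero => simp [pvStep]
      | succ i =>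
        simp only [pvStep, List.getD_cons_succ]
        exact ih t i (by simpa using hi) (by simpa using ht)

-- the streaming row pass, read at one position, is the cell-fold over that position's column
lemma state_getD (rows : List (List Char)) (init : List (Option Char × Bool)) (i : Nat)
    (hi : i < init.length) (hr : ∀ r ∈ rows, r.length = init.length) :
    (rows.foldl pvStep init).getD i (none, false)
      = (rows.map (fun r => r.getD i 'N')).foldl pvCell (init.getD i (none, false)) := by
  induction rows generalizing init with
  | nil => simp
  | cons r rows ih =>
    simp only [List.foldl_cons, List.map_cons]
    have hlen : (pvStep init r).length = init.length := pvStep_length init r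
    rw [ih (pvStep init r) (by omega)
      (by intro u hu; rw [hlen]; exact hr u (by simp [hu])),
      pvStep_getD init r i hi (by rw [hr r (by simp)]; exact hi)]

-- cell-level facts about pvCell
lemma pvCell_N (p : Option Char × Bool) : pvCell p 'N' = p := by simp [pvCell]

lemma pvCell_some (f : Char) (v : Bool) (c : Char) (h : c ≠ 'N') :
    pvCell (some f, v) c = (some f, v || decide (c ≠ f)) := by simp [pvCell, h]

lemma pvCell_none (v : Bool) (c : Char) (h : c ≠ 'N') :
    pvCell ((none : Option Char), v) c = (some c, v) := by simp [pvCell, h]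

lemma getD_rep {α : Type} (n i : Nat) (a : α) : (List.replicate n a).getD i a = a := by
  rw [List.getD_eq_getElem?_getD, List.getElem?_replicate]
  split <;> rfl

lemma fold_snd_some (l : List Char) (f : Char) (v : Bool) :
    ((l.foldl pvCell (some f, v)).2 = true) ↔ (v = true ∨ ∃ c ∈ l, c ≠ 'N' ∧ c ≠ f) := by
  induction l generalizing v with
  | nil => simp
  | cons c l ih =>
    by_cases h : c = 'N'
    · subst h
      rw [List.foldl_cons, pvCell_N, ih]
      constructor
      · rintro (hv | ⟨x, hx, hxn, hxf⟩)
        · exact Or.inl hv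
        · exact Or.inr ⟨x, List.mem_cons_of_mem _ hx, hxn, hxf⟩
      · rintro (hv | ⟨x, hx, hxn, hxf⟩)
        · exact Or.inl hv
        · rcases List.mem_cons.mp hx with rfl | hx
          · exact absurd rfl hxn
          · exact Or.inr ⟨x, hx, hxn, hxf⟩
    · rw [List.foldl_cons, pvCell_some _ _ _ h, ih]
      constructor
      · rintro (hv | ⟨x, hx, hxn, hxf⟩)
        · rcases (Bool.or_eq_true _ _).mp hv with hv | hd
          · exact Or.inl hv
          · exact Or.inr ⟨c, List.mem_cons_self, h, of_decide_eq_true hd⟩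
        · exact Or.inr ⟨x, List.mem_cons_of_mem _ hx, hxn, hxf⟩
      · rintro (hv | ⟨x, hx, hxn, hxf⟩)
        · exact Or.inl (by rw [hv]; simp)
        · rcases List.mem_cons.mp hx with rfl | hx
          · exact Or.inl (by simp [hxf])
          · exact Or.inr ⟨x, hx, hxn, hxf⟩

lemma fold_snd_none (l : List Char) (hl : ∀ c ∈ l, c ≠ 'N') :
    ((l.foldl pvCell ((none : Option Char), false)).2 = true) ↔ (∃ a ∈ l, ∃ b ∈ l, a ≠ b) := by
  cases l with
  | nil => simp
  | cons c l =>
    have hc : c ≠ 'N' := hl c List.mem_cons_self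
    rw [List.foldl_cons, pvCell_none _ _ hc, fold_snd_some]
    constructor
    · rintro (h | ⟨x, hx, hxn, hxf⟩)
      · simp at h
      · exact ⟨x, List.mem_cons_of_mem _ hx, c, List.mem_cons_self, hxf⟩
    · rintro ⟨a, ha, b, hb, hab⟩
      rcases List.mem_cons.mp ha with rfl | ha
      · rcases List.mem_cons.mp hb with rfl | hb
        · exact absurd rfl hab
        · exact Or.inr ⟨b, hb, hl b (List.mem_cons_of_mem _ hb), hab.symm⟩
      · by_cases haf : a = c
        · subst haf
          rcases List.mem_cons.mp hb with rfl | hb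
          · exact absurd rfl hab
          · exact Or.inr ⟨b, hb, hl b (List.mem_cons_of_mem _ hb), hab.symm⟩
        · exact Or.inr ⟨a, ha, hl a (List.mem_cons_of_mem _ ha), haf⟩

-- pvCell skips 'N' characters, so the column fold equals the fold over the non-'N' ones
lemma fold_filter (cs : List Char) (p : Option Char × Bool) :
    cs.foldl pvCell p = (cs.filter (fun c => c ≠ 'N')).foldl pvCell p := by
  induction cs generalizing p with
  | nil => rfl
  | cons c cs ih =>
    by_cases h : c = 'N'
    · subst h
      rw [List.foldl_cons, pvCell_N, ih]
      simp
    · rw [List.foldl_cons, ih, List.filter_cons,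
          if_pos (show decide (c ≠ 'N') = true by simpa using h), List.foldl_cons]

lemma subsingleton_of_len_le_one {α : Type} (l : List α) (h : l.length ≤ 1) :
    ∀ a ∈ l, ∀ b ∈ l, a = b := by
  match l with
  | [] => simp
  | [x] => simp
  | x :: y :: t => simp at h

lemma set_len_gt_one (l : List Char) :
    ((PySem.Set.ofList l).length > 1) ↔ (∃ a ∈ l, ∃ b ∈ l, a ≠ b) := by
  constructor
  · intro h
    match hs : PySem.Set.ofList l with
    | [] => rw [hs] at h; simp at h
    | [x] => rw [hs] at h; simp at h
    | x :: y :: t =>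
      have hnd : (PySem.Set.ofList l).Nodup := PySem.Set.nodup_ofList l
      rw [hs] at hnd
      have hxy : x ≠ y := by
        intro he; exact (List.nodup_cons.mp hnd).1 (by simp [he])
      exact ⟨x, (PySem.Set.mem_ofList _ _).mp (by rw [hs]; simp),
             y, (PySem.Set.mem_ofList _ _).mp (by rw [hs]; simp), hxy⟩
  · rintro ⟨a, ha, b, hb, hab⟩
    by_contra h
    push_neg at h
    exact hab (subsingleton_of_len_le_one _ h a ((PySem.Set.mem_ofList _ _).mpr ha)
      b ((PySem.Set.mem_ofList _ _).mpr hb))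

-- the two per-position conditions agree on any rectangular table, hence so do the outputs
lemma core (tl : List (List Char))
    (hu : ∀ a ∈ tl, ∀ b ∈ tl, a.length = b.length) :
    (List.range (tl.headD []).length).filterMap (fun i =>
      if PySem.Set.len (PySem.Set.ofList ((tl.map (fun t => t.getD i 'N')).filter (fun c => c ≠ 'N'))) > 1
      then some ((i : Int), tl.map (fun t => String.ofList [t.getD i 'N'])) else none)
    = (List.range (tl.headD []).length).filterMap (fun i =>
      if ((tl.foldl pvStep (List.replicate (tl.headD []).length ((none : Option Char), false))).getD i (none, false)).2
      then some ((i : Int), tl.map (fun t => String.ofList [t.getD i 'N'])) else none) := by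
  apply List.filterMap_congr
  intro i hi
  have hiL : i < (tl.headD []).length := List.mem_range.mp hi
  have hrect : ∀ r ∈ tl, r.length = (List.replicate (tl.headD []).length ((none : Option Char), false)).length := by
    intro r hr
    rw [List.length_replicate]
    cases tl with
    | nil => simp at hr
    | cons t ts => exact hu r hr t (by simp)
  have hstate := state_getD tl (List.replicate (tl.headD []).length ((none : Option Char), false)) i
    (by simpa using hiL) hrect
  rw [hstate, getD_rep _ _ _, fold_filter]
  have hfl : ∀ c ∈ (tl.map (fun t => t.getD i 'N')).filter (fun c => c ≠ 'N'), c ≠ 'N' := by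
    intro c hc; simpa using (List.mem_filter.mp hc).2
  have hiff := fold_snd_none _ hfl
  have hset := set_len_gt_one ((tl.map (fun t => t.getD i 'N')).filter (fun c => c ≠ 'N'))
  rw [show PySem.Set.len (PySem.Set.ofList ((tl.map (fun t => t.getD i 'N')).filter (fun c => c ≠ 'N')))
        = (PySem.Set.ofList ((tl.map (fun t => t.getD i 'N')).filter (fun c => c ≠ 'N'))).length from rfl]
  have hcast : ((((PySem.Set.ofList ((tl.map (fun t => t.getD i 'N')).filter (fun c => c ≠ 'N'))).length : Int) > 1)
      ↔ (PySem.Set.ofList ((tl.map (fun t => t.getD i 'N')).filter (fun c => c ≠ 'N'))).length > 1) := by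
    exact_mod_cast Iff.rfl
  have hA := hcast.trans (hset.trans hiff.symm)
  by_cases hb : (((tl.map (fun t => t.getD i 'N')).filter (fun c => c ≠ 'N')).foldl pvCell
      ((none : Option Char), false)).2 = true
  · rw [if_pos hb, if_pos (hA.mpr hb)]
  · rw [if_neg hb, if_neg (fun hc => hb (hA.mp hc))]

lemma min?_getD_nonneg (xs : List Int) (h : ∀ x ∈ xs, 0 ≤ x) :
    0 ≤ (PySem.List.min? xs (fun x => x)).getD 0 := by
  cases hm : PySem.List.min? xs (fun x => x) with
  | none => simp
  | some m => simpa using h m (PySem.List.min?_mem hm)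

-- ===== VERDICT (by name: the statement is the Claim_ definition above) =====
theorem compareTags_spec : Claim_equal_compareTags := by
  intro taglist trim _ hpre
  unfold Spec_compareTags compareTags compareTags_alt
  simp only []
  set tl0 := taglist.map String.toList with htl0
  set lens := tl0.map (fun t => (t.length : Int)) with hlens
  have hne0 : tl0 ≠ [] := by
    simp only [htl0, ne_eq, List.map_eq_nil_iff]
    exact hpre.1
  have hlne : lens ≠ [] := by simp [hlens, hne0]
  split_ifs with h1 h2
  · -- trim branch: slice = take, then both sides act on the same rectangular table
    have hmin : 0 ≤ (PySem.List.min? lens (fun x => x)).getD 0 := by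
      apply min?_getD_nonneg
      intro x hx
      simp only [hlens, List.mem_map] at hx
      obtain ⟨t, -, rfl⟩ := hx
      positivity
    have hsl : ∀ tag : List Char,
        PySem.List.slice tag none (some ((PySem.List.min? lens (fun x => x)).getD 0))
          = tag.take ((PySem.List.min? lens (fun x => x)).getD 0).toNat := by
      intro tag
      exact PySem.List.slice_to tag hmin
    simp only [hsl]
    apply core
    obtain ⟨m, hm⟩ := Option.ne_none_iff_exists'.mp
      (by simpa [PySem.List.min?_eq_none_iff] using hlne :
        PySem.List.min? lens (fun x => x) ≠ none)
    have hmle : ∀ t ∈ tl0, m.toNat ≤ t.length := by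
      intro t ht
      have := PySem.List.min?_isMin hm ((t.length : Int))
        (by simp only [hlens, List.mem_map]; exact ⟨t, ht, rfl⟩)
      omega
    intro a ha b hb
    simp only [List.mem_map] at ha hb
    obtain ⟨ta, hta, rfl⟩ := ha
    obtain ⟨tb, htb, rfl⟩ := hb
    simp [hm, List.length_take, Nat.min_eq_left (hmle ta hta), Nat.min_eq_left (hmle tb htb)]
  · -- pad branch
    apply core
    obtain ⟨m, hm⟩ := Option.ne_none_iff_exists'.mp
      (by simpa [PySem.List.max?_eq_none_iff] using hlne :
        PySem.List.max? lens (fun x => x) ≠ none)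
    have hmge : ∀ t ∈ tl0, t.length ≤ m.toNat := by
      intro t ht
      have := PySem.List.max?_isMax hm ((t.length : Int))
        (by simp only [hlens, List.mem_map]; exact ⟨t, ht, rfl⟩)
      omega
    intro a ha b hb
    simp only [List.mem_map] at ha hb
    obtain ⟨ta, hta, rfl⟩ := ha
    obtain ⟨tb, htb, rfl⟩ := hb
    have h1 := hmge ta hta
    have h2 := hmge tb htb
    simp only [hm, Option.getD_some, List.length_append, List.length_replicate]
    omega
  · -- lengths already uniform
    apply core
    intro a ha b hb
    have hsub : (PySem.Set.ofList lens).length ≤ 1 := by omega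
    have := subsingleton_of_len_le_one _ hsub ((a.length : Int))
      (by rw [PySem.Set.mem_ofList _ _]; simp only [hlens, List.mem_map]; exact ⟨a, ha, rfl⟩)
      ((b.length : Int))
      (by rw [PySem.Set.mem_ofList _ _]; simp only [hlens, List.mem_map]; exact ⟨b, hb, rfl⟩)
    omega
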